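-- pv_equiv track=rewrite | github.com/a-to-z-study/algorithm | yeon/programmers/level2/ChoosingTangerine.py | solution
-- ===== SOURCE A (Python) =====
-- from collections import Counter
--
-- def solution(k, tangerine):
--     counter = Counter(tangerine)
--     answer = 0
--     total = 0
--
--     for item in counter.most_common():
--         answer += 1
--         total += item[1]
--
--         if total >= k:
--             return answer
-- ===== SOURCE B (Python) =====
-- def solution(k, tangerine):
--     # Count frequencies, bucket the frequencies by value (all lie in 1..n), then scan
--     # buckets from the largest frequency down, taking each whole bucket arithmetically
--     # instead of sorting the distinct sizes and walking them one by one.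
--     freq = {}
--     for t in tangerine:
--         freq[t] = freq.get(t, 0) + 1
--     buckets = {}
--     for c in freq.values():
--         buckets[c] = buckets.get(c, 0) + 1
--     answer = 0
--     total = 0
--     for c in range(len(tangerine), 0, -1):
--         m = buckets.get(c, 0)
--         if m == 0:
--             continue
--         if total + c * m >= k:
--             # the greedy takes a box, then checks: at least one box from this bucket
--             return answer + max(1, (k - total + c - 1) // c)
--         answer += m
--         total += c * m
--     return answer
-- ===== Notes on version B (the rewrite author's own statement) =====
-- stated objective: alternative
-- what changed: replaces Counter.most_common() (a comparison sort of the distinct sizes by count) plus a one-item-at-a-time scan with a bucket count of the frequencies (all lie in 1..n) and a high-to-low bucket scan that consumes each whole bucket with one ceiling division; intended as faster, but measured only ~1.25x at the largest size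
-- outside the precondition, e.g. on solution(3, [1, 1]): A returns None, B returns 1
import Mathlib
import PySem

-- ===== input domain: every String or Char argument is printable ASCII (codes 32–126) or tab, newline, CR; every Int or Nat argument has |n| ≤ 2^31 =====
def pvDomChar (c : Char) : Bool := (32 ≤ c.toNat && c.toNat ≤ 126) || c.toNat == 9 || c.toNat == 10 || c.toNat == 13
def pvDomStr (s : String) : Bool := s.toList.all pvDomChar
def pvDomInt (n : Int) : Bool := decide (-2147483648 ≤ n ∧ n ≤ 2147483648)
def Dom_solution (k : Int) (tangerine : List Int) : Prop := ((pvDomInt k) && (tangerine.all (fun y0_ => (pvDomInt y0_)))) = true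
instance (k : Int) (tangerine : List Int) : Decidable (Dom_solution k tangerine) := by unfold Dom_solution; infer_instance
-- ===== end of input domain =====

-- B replaces A's sort of the distinct sizes by count with a bucket count of the
-- frequencies and a high-to-low bucket scan (one ceiling division per whole bucket).

-- ===== PORT A =====
-- the 'for item in counter.most_common(): …' loop with its early return (none = fell off the loop, Python returns None)
def solutionLoopA (k : Int) : List (Int × Int) → Int → Int → Option Int
  | [], _, _ => none
  | item :: rest, answer, total =>
    let answer := answer + 1
    let total := total + item.2
    if total ≥ k then some answer else solutionLoopA k rest answer total

def solution (k : Int) (tangerine : List Int) : Int :=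
  let counter := PySem.Dict.counter tangerine
  -- counter.most_common() = sorted(counter.items(), key=itemgetter(1), reverse=True)
  let mc := PySem.List.sorted counter.items (fun p => p.2) true
  -- Python returns None when the loop is exhausted (outside Pre_); the port returns 0 there
  (solutionLoopA k mc 0 0).getD 0

-- ===== PORT B =====
-- the 'for c in range(len(tangerine), 0, -1): …' loop of Source B with its early return
def solutionLoopB (k : Int) (buckets : PySem.Dict Int Int) : List Int → Int → Int → Int
  | [], answer, _ => answer
  | c :: cs, answer, total =>
    let m := buckets.getD c 0
    if m = 0 then solutionLoopB k buckets cs answer total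
    else if total + c * m ≥ k then answer + max 1 (PySem.Int.floordiv (k - total + c - 1) c)
    else solutionLoopB k buckets cs (answer + m) (total + c * m)

def solution_alt (k : Int) (tangerine : List Int) : Int :=
  let freq := tangerine.foldl (fun d t => d.insert t (d.getD t 0 + 1)) PySem.Dict.empty
  let buckets := freq.values.foldl (fun d c => d.insert c (d.getD c 0 + 1)) PySem.Dict.empty
  solutionLoopB k buckets (PySem.List.pyRange (tangerine.length : Int) 0 (-1)) 0 0

-- ===== PRECONDITION & SPEC =====
-- Pre_ excludes exactly the inputs (k > len(tangerine), including the empty list) on which A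
-- falls off its loop and returns None, which is not a value of the declared int type.
def Pre_solution (k : Int) (tangerine : List Int) : Prop :=
  tangerine ≠ [] ∧ k ≤ (tangerine.length : Int)
instance (k : Int) (tangerine : List Int) : Decidable (Pre_solution k tangerine) := by
  unfold Pre_solution; infer_instance

def pvWitness_solution : Int × List Int := (4, [1, 2, 2, 3, 3, 3])

def Spec_solution (k : Int) (tangerine : List Int) (out : Int) : Prop := out = solution_alt k tangerine
instance (k : Int) (tangerine : List Int) (out : Int) : Decidable (Spec_solution k tangerine out) := by unfold Spec_solution; infer_instance

-- ===== CLAIM (what is proved, stated in full; the proofs are below) =====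
def Claim_equal_solution : Prop := ∀ (k : Int) (tangerine : List Int), Dom_solution k tangerine → Pre_solution k tangerine → Spec_solution k tangerine (solution k tangerine)

-- ===== LEMMAS AND PROOFS =====

-- the common abstraction: scan a list of counts, one count at a time (A's loop, keys forgotten)
def scanCounts (k : Int) : List Int → Int → Int → Option Int
  | [], _, _ => none
  | c :: rest, answer, total =>
    if total + c ≥ k then some (answer + 1) else scanCounts k rest (answer + 1) (total + c)

theorem loopA_eq_scan (k : Int) : ∀ (l : List (Int × Int)) (a t : Int),
    solutionLoopA k l a t = scanCounts k (l.map (·.2)) a t := by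
  intro l
  induction l with
  | nil => intro a t; rfl
  | cons x xs ih =>
    intro a t
    simp only [solutionLoopA, scanCounts, List.map]
    split <;> simp [ih]

-- ceiling division steps by one when the numerator grows by the divisor
theorem fdiv_add_self (x c : Int) (hc : 0 < c) :
    PySem.Int.floordiv (x + c) c = PySem.Int.floordiv x c + 1 := by
  simp only [PySem.Int.floordiv]
  have h := Int.add_mul_fdiv_right x 1 (show c ≠ 0 by omega)
  simpa using h

-- at most one box is needed from a bucket of size c when at most c tangerines are missing
theorem max_one_fdiv_of_le (x c : Int) (hc : 0 < c) (h2 : x ≤ c) :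
    max 1 (PySem.Int.floordiv (x + c - 1) c) = 1 := by
  refine max_eq_left ?_
  have h := (PySem.Int.floordiv_lt_iff_lt_mul (a := x + c - 1) (b := c) (q := 2) hc).mpr (by nlinarith)
  omega

-- the max is vacuous once at least one full bucket item is still missing
theorem max_one_fdiv_of_ge (x c : Int) (hc : 0 < c) (h1 : c ≤ x) :
    max 1 (PySem.Int.floordiv (x + c - 1) c) = PySem.Int.floordiv (x + c - 1) c := by
  refine max_eq_right ?_
  have h := (PySem.Int.le_floordiv_iff_mul_le (a := x + c - 1) (b := c) (q := 1) hc).mpr (by nlinarith)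
  omega

-- B's whole-bucket step agrees with m one-at-a-time steps of scanCounts (m ≥ 1)
theorem scan_replicate (k c : Int) (hc : 1 ≤ c) : ∀ (m : Nat) (rest : List Int) (a t : Int),
    1 ≤ m →
    scanCounts k (List.replicate m c ++ rest) a t =
      if t + c * (m : Int) ≥ k then some (a + max 1 (PySem.Int.floordiv (k - t + c - 1) c))
      else scanCounts k rest (a + (m : Int)) (t + c * (m : Int)) := by
  intro m
  induction m with
  | zero => intro rest a t hm; omega
  | succ m ih =>
    intro rest a t _
    have hrep : List.replicate (m + 1) c = c :: List.replicate m c := rfl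
    rw [hrep, List.cons_append]
    simp only [scanCounts]
    push_cast
    have hcm : (0:Int) ≤ c * (m : Int) := by positivity
    by_cases h : t + c ≥ k
    · rw [if_pos h, if_pos (by nlinarith)]
      have he : max 1 (PySem.Int.floordiv (k - t + c - 1) c) = 1 := by
        have := max_one_fdiv_of_le (k - t) c (by omega) (by omega)
        rw [show k - t + c - 1 = (k - t) + c - 1 by ring]
        exact this
      rw [he]
    · -- from here on at least one more tangerine is missing than a bucket item covers
      rcases Nat.eq_zero_or_pos m with hm0 | hm1
      · subst hm0
        simp only [List.replicate, List.nil_append]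
        norm_num
        split_ifs with h2
        · omega
        · rfl
      · rw [if_neg h, ih rest (a + 1) (t + c) hm1]
        have e1 : t + c + c * (m : Int) = t + c * ((m : Int) + 1) := by ring
        have e2 : a + 1 + (m : Int) = a + ((m : Int) + 1) := by ring
        have e3 : max 1 (PySem.Int.floordiv (k - t + c - 1) c)
            = max 1 (PySem.Int.floordiv (k - (t + c) + c - 1) c) + 1 := by
          have hx2 : 1 ≤ k - t - c := by omega
          rw [show k - t + c - 1 = (k - t - c) + c + c - 1 by ring,
              show k - (t + c) + c - 1 = (k - t - c) + c - 1 by ring]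
          rcases le_or_gt c (k - t - c) with hge | hlt
          · rw [max_one_fdiv_of_ge _ _ (by omega) (by omega),
                max_one_fdiv_of_ge _ _ (by omega) hge,
                show (k - t - c) + c + c - 1 = ((k - t - c) + c - 1) + c by ring,
                fdiv_add_self _ _ (by omega)]
          · rw [max_one_fdiv_of_ge _ _ (by omega) (by omega),
                max_one_fdiv_of_le _ _ (by omega) (by omega),
                PySem.Int.floordiv_eq_iff_of_pos (by omega)]
            constructor <;> nlinarith
        rw [e1, e2, e3]
        split_ifs with h1
        · congr 1; ring
        · rfl

def flatB (B : PySem.Dict Int Int) (cs : List Int) : List Int :=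
  cs.flatMap (fun c => List.replicate (B.getD c 0).toNat c)

theorem flatB_nil (B : PySem.Dict Int Int) : flatB B [] = [] := rfl

theorem flatB_cons (B : PySem.Dict Int Int) (c : Int) (cs : List Int) :
    flatB B (c :: cs) = List.replicate (B.getD c 0).toNat c ++ flatB B cs := by
  simp [flatB]

-- B's loop, run down the bucket list, equals scanCounts on the flattened count list
theorem loopB_eq_scan (k : Int) (B : PySem.Dict Int Int) : ∀ (cs : List Int) (a t : Int),
    (t < k ∨ flatB B cs ≠ []) → (∀ c ∈ cs, 1 ≤ c) → (∀ c ∈ cs, 0 ≤ B.getD c 0) →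
    k ≤ t + (flatB B cs).sum →
    ∃ r, scanCounts k (flatB B cs) a t = some r ∧ solutionLoopB k B cs a t = r := by
  intro cs
  induction cs with
  | nil =>
    intro a t ht _ _ hsum
    rw [flatB_nil] at hsum ht
    simp at hsum ht
    omega
  | cons c cs ih =>
    intro a t ht hc1 hc0 hsum
    have hc : 1 ≤ c := hc1 c (List.mem_cons_self ..)
    have hm0 : 0 ≤ B.getD c 0 := hc0 c (List.mem_cons_self ..)
    have hmc : ((B.getD c 0).toNat : Int) = B.getD c 0 := Int.toNat_of_nonneg hm0
    rw [flatB_cons] at hsum ht ⊢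
    by_cases hm : B.getD c 0 = 0
    · simp only [hm, Int.toNat_zero, List.replicate, List.nil_append] at hsum ht ⊢
      obtain ⟨r, h1, h2⟩ := ih a t ht (fun x hx => hc1 x (List.mem_cons_of_mem _ hx))
        (fun x hx => hc0 x (List.mem_cons_of_mem _ hx)) hsum
      exact ⟨r, h1, by simp only [solutionLoopB]; rw [if_pos hm]; exact h2⟩
    · have hm1 : 1 ≤ (B.getD c 0).toNat := by omega
      rw [scan_replicate k c hc _ _ a t hm1, hmc]
      have hsum' : k ≤ (t + c * B.getD c 0) + (flatB B cs).sum := by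
        rw [List.sum_append, List.sum_replicate, nsmul_eq_mul, hmc] at hsum
        linarith
      by_cases hcond : t + c * B.getD c 0 ≥ k
      · refine ⟨a + max 1 (PySem.Int.floordiv (k - t + c - 1) c), by rw [if_pos hcond], ?_⟩
        simp only [solutionLoopB]
        rw [if_neg hm, if_pos hcond]
      · obtain ⟨r, h1, h2⟩ := ih (a + B.getD c 0) (t + c * B.getD c 0) (Or.inl (by omega))
          (fun x hx => hc1 x (List.mem_cons_of_mem _ hx))
          (fun x hx => hc0 x (List.mem_cons_of_mem _ hx)) hsum'
        refine ⟨r, by rw [if_neg hcond]; exact h1, ?_⟩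
        simp only [solutionLoopB]
        rw [if_neg hm, if_neg hcond]
        exact h2

-- the multiset of counts of xs, in first-occurrence order (= counter(xs).values())
def valsOf (xs : List Int) : List Int :=
  (PySem.Set.ofList xs).map (fun v => ((xs.count v : Nat) : Int))

theorem mem_valsOf {xs : List Int} {v : Int} (h : v ∈ valsOf xs) :
    1 ≤ v ∧ v ≤ (xs.length : Int) := by
  obtain ⟨u, hu, rfl⟩ := List.mem_map.mp h
  have hu' : u ∈ xs := (PySem.Set.mem_ofList xs u).mp hu
  have h1 : 0 < xs.count u := List.count_pos_iff.mpr hu'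
  have h2 : xs.count u ≤ xs.length := List.count_le_length
  omega

theorem sum_map_intCast (l : List Nat) : (l.map (fun m => ((m : Nat) : Int))).sum = ((l.sum : Nat) : Int) := by
  induction l with
  | nil => rfl
  | cons x xs ih => simp only [List.map_cons, List.sum_cons, ih]; push_cast; ring

theorem sum_valsOf (xs : List Int) : (valsOf xs).sum = (xs.length : Int) := by
  have hmap : valsOf xs = ((PySem.Set.ofList xs).map (fun v => xs.count v)).map (fun m => ((m : Nat) : Int)) := by
    simp [valsOf, List.map_map]
  have hperm : (PySem.Set.ofList xs : List Int).Perm xs.dedup := by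
    rw [List.perm_iff_count]
    intro a
    by_cases ha : a ∈ xs
    · rw [List.count_eq_one_of_mem (PySem.Set.nodup_ofList xs) ((PySem.Set.mem_ofList xs a).mpr ha),
        List.count_eq_one_of_mem xs.nodup_dedup (List.mem_dedup.mpr ha)]
    · rw [List.count_eq_zero_of_not_mem (fun hx => ha ((PySem.Set.mem_ofList xs a).mp hx)),
        List.count_eq_zero_of_not_mem (fun hx => ha (List.mem_dedup.mp hx))]
  have hsum : ((PySem.Set.ofList xs).map (fun v => xs.count v)).sum = xs.length := by
    rw [(hperm.map (fun v => xs.count v)).sum_eq]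
    exact List.sum_map_count_dedup_eq_length xs
  rw [hmap, sum_map_intCast, hsum]

theorem mem_flatB {B : PySem.Dict Int Int} {cs : List Int} {x : Int} (h : x ∈ flatB B cs) :
    x ∈ cs := by
  obtain ⟨c, hc, hx⟩ := List.mem_flatMap.mp h
  rw [List.eq_of_mem_replicate hx]
  exact hc

theorem flatB_pairwise (B : PySem.Dict Int Int) : ∀ (cs : List Int),
    cs.Pairwise (fun a b => b < a) → (flatB B cs).Pairwise (fun a b => b ≤ a) := by
  intro cs
  induction cs with
  | nil => intro _; exact List.Pairwise.nil
  | cons c cs ih =>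
    intro hp
    rw [flatB_cons, List.pairwise_append]
    refine ⟨List.pairwise_replicate.mpr (Or.inr le_rfl), ih hp.of_cons, ?_⟩
    intro a ha b hb
    rw [List.eq_of_mem_replicate ha]
    exact le_of_lt (List.rel_of_pairwise_cons hp (mem_flatB hb))

theorem count_flatB (B : PySem.Dict Int Int) : ∀ (cs : List Int), cs.Nodup → ∀ (x : Int),
    (flatB B cs).count x = if x ∈ cs then (B.getD x 0).toNat else 0 := by
  intro cs
  induction cs with
  | nil => intro _ x; simp [flatB_nil]
  | cons c cs ih =>
    intro hnd x
    rw [flatB_cons, List.count_append, List.count_replicate, ih hnd.of_cons x]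
    by_cases hx : x = c
    · subst hx
      have : x ∉ cs := (List.nodup_cons.mp hnd).1
      simp [this]
    · simp [hx, Ne.symm hx, List.mem_cons]

theorem pyRange_down_pairwise (n : Int) : (PySem.List.pyRange n 0 (-1)).Pairwise (fun a b => b < a) := by
  rw [PySem.List.pyRange_neg_one_eq_reverse, List.pairwise_reverse]
  exact PySem.List.pairwise_lt_pyRange_one _ _

theorem pyRange_down_nodup (n : Int) : (PySem.List.pyRange n 0 (-1)).Nodup := by
  rw [PySem.List.pyRange_neg_one_eq_reverse]
  exact List.nodup_reverse.mpr (PySem.List.nodup_pyRange_one _ _)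

theorem vals_eq (xs : List Int) : (PySem.Dict.counter xs).items.map (fun p => p.2) = valsOf xs := by
  rw [PySem.Dict.items_counter, List.map_map]
  rfl

-- the counts of A's most_common(), read off in order, are exactly B's bucket expansion
theorem descList_eq_flatB (xs : List Int) :
    (PySem.List.sorted (PySem.Dict.counter xs).items (fun p => p.2) true).map (fun p => p.2)
      = flatB (PySem.Dict.counter (valsOf xs)) (PySem.List.pyRange (xs.length : Int) 0 (-1)) := by
  have hnd := pyRange_down_nodup (xs.length : Int)
  have p1 : ((PySem.List.sorted (PySem.Dict.counter xs).items (fun p => p.2) true).map (fun p => p.2)).Perm (valsOf xs) := by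
    rw [← vals_eq xs]
    exact (PySem.List.sorted_perm _ _ _).map _
  have p2 : (flatB (PySem.Dict.counter (valsOf xs)) (PySem.List.pyRange (xs.length : Int) 0 (-1))).Perm (valsOf xs) := by
    rw [List.perm_iff_count]
    intro x
    rw [count_flatB _ _ hnd x, PySem.Dict.getD_counter]
    by_cases hx : x ∈ PySem.List.pyRange (xs.length : Int) 0 (-1)
    · simp [hx]
    · rw [if_neg hx, List.count_eq_zero_of_not_mem]
      intro hv
      exact hx (PySem.List.mem_pyRange_neg_one.mpr (by have := mem_valsOf hv; omega))
  refine List.Perm.eq_of_pairwise (fun a b _ _ h1 h2 => le_antisymm h2 h1) ?_ ?_ (p1.trans p2.symm)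
  · exact (PySem.List.sorted_pairwise_rev _ _).map _ (fun a b h => h)
  · exact flatB_pairwise _ _ (pyRange_down_pairwise _)

-- ===== VERDICT (by name: the statement is the Claim_ definition above) =====
theorem solution_spec : Claim_equal_solution := by
  intro k xs _ hpre
  obtain ⟨hne, hk2⟩ := hpre
  have hlen : 1 ≤ xs.length := List.length_pos_iff.mpr hne
  show (solutionLoopA k (PySem.List.sorted (PySem.Dict.counter xs).items (fun p => p.2) true) 0 0).getD 0
      = solutionLoopB k (List.foldl (fun d c => d.insert c (d.getD c 0 + 1)) PySem.Dict.empty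
          (List.foldl (fun d t => d.insert t (d.getD t 0 + 1)) PySem.Dict.empty xs).values)
          (PySem.List.pyRange (xs.length : Int) 0 (-1)) 0 0
  rw [loopA_eq_scan, PySem.Dict.foldl_insert_getD_add_one_eq_counter]
  have hvals : (PySem.Dict.counter xs).values = valsOf xs := by
    simp only [PySem.Dict.values]
    exact vals_eq xs
  rw [PySem.Dict.foldl_insert_getD_add_one_eq_counter xs, hvals, descList_eq_flatB]
  have hsum : (flatB (PySem.Dict.counter (valsOf xs)) (PySem.List.pyRange (xs.length : Int) 0 (-1))).sum
      = (xs.length : Int) := by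
    rw [← descList_eq_flatB]
    have := ((PySem.List.sorted_perm (PySem.Dict.counter xs).items (fun p => p.2) true).map (fun p => p.2)).sum_eq
    rw [this, vals_eq, sum_valsOf]
  obtain ⟨r, h1, h2⟩ := loopB_eq_scan k (PySem.Dict.counter (valsOf xs))
    (PySem.List.pyRange (xs.length : Int) 0 (-1)) 0 0
    (Or.inr (fun hnil => by rw [hnil] at hsum; simp at hsum; omega))
    (fun c hc => by have := PySem.List.mem_pyRange_neg_one.mp hc; omega)
    (fun c _ => by rw [PySem.Dict.getD_counter]; positivity)
    (by rw [hsum]; omega)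
  rw [h1, h2, Option.getD_some]
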